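-- pv_equiv track=rewrite | github.com/jlei50/myWorkshop | 03_py/warmup2/string_match.py | string_match
-- ===== SOURCE A (Python) =====
-- def string_match(a, b):
--   num = 0
--   for chrs in range(len(a) - 1):
--     ch = a[chrs:chrs+2]
--     for chrs2 in range(len(b) - 1):
--       if ch == b[chrs2:chrs+2]:
--         num += 1
--
--   return num
-- ===== SOURCE B (Python) =====
-- def string_match(a, b):
--     n = min(len(a), len(b))
--     return sum(1 for i in range(n - 1) if a[i:i+2] == b[i:i+2])
-- ===== Notes on version B (the rewrite author's own statement) =====
-- stated objective: faster
-- what changed: Replaces A's nested loops (every start in a against every start in b) by a single pass over the common prefix that compares a[i:i+2] with b[i:i+2] once per position; B does not reproduce the stray matches of b's last two characters produced by A's buggy inner slice b[chrs2:chrs+2] (see differs).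
-- intended difference: When len(b)>=2 and some window a[i:i+2] with len(b)-1 <= i <= len(a)-2 equals b's LAST two characters, A's buggy inner slice b[chrs2:chrs+2] counts each such window as an extra match (A('xyab','ab')=1); B returns only the count of positions i with a[i:i+2]==b[i:i+2] (0 there), the intended value of this 2-char substring-matching exercise. — e.g. on string_match("xyab", "ab"): A returns 1, B returns 0
import Mathlib
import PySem

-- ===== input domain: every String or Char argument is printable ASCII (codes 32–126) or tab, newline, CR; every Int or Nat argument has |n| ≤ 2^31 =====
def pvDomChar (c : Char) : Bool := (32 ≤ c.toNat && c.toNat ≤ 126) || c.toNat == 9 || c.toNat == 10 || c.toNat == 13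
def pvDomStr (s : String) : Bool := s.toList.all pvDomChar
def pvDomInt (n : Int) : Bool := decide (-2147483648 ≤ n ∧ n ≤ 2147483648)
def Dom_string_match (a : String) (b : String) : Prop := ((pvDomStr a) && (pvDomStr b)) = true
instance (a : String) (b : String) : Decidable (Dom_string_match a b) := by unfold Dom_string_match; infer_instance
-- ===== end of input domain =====

-- B replaces A's nested loops by a single pass over the common prefix of a and b; B does not reproduce the
-- stray matches of b's last two characters that A's buggy inner slice b[chrs2:chrs+2] produces (see D_ below).

-- ===== PORT A =====
def string_match (a : String) (b : String) : Int :=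
  (PySem.List.pyRange 0 ((a.toList.length : Int) - 1) 1).foldl (fun num chrs =>
    let ch := PySem.List.slice a.toList (some chrs) (some (chrs + 2))
    (PySem.List.pyRange 0 ((b.toList.length : Int) - 1) 1).foldl (fun num chrs2 =>
      if ch = PySem.List.slice b.toList (some chrs2) (some (chrs + 2)) then num + 1 else num) num) 0

-- ===== PORT B =====
def string_match_alt (a : String) (b : String) : Int :=
  let n : Int := min (a.toList.length : Int) (b.toList.length : Int)
  ((PySem.List.pyRange 0 (n - 1) 1).countP (fun i =>
    PySem.List.slice a.toList (some i) (some (i + 2)) == PySem.List.slice b.toList (some i) (some (i + 2))) : Int)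

-- ===== PRECONDITION & SPEC =====
-- When len(b) >= 2 and some 2-char window of a at a position i with len(b)-1 <= i <= len(a)-2 equals the LAST
-- two characters of b, A's buggy inner slice b[chrs2:chrs+2] counts each such window as a match; B returns only
-- the count of positions i with a[i:i+2] == b[i:i+2], the intended value of this substring-matching exercise.
def D_string_match (a : String) (b : String) : Prop :=
  2 ≤ b.toList.length ∧
  ∃ i ∈ List.range (a.toList.length - 1),
    b.toList.length - 1 ≤ i ∧ (a.toList.drop i).take 2 = b.toList.drop (b.toList.length - 2)
instance (a : String) (b : String) : Decidable (D_string_match a b) := by unfold D_string_match; infer_instance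

def Spec_string_match (a : String) (b : String) (out : Int) : Prop := ¬ D_string_match a b → out = string_match_alt a b
instance (a : String) (b : String) (out : Int) : Decidable (Spec_string_match a b out) := by unfold Spec_string_match; infer_instance

def pvDiffWitness_string_match : String × String := ("xyab", "ab")
def pvDiffWitnessOut_string_match : Int × Int := (1, 0)

-- ===== CLAIM (what is proved, stated in full; the proofs are below) =====
def Claim_unchanged_string_match : Prop := ∀ (a : String) (b : String), Dom_string_match a b → Spec_string_match a b (string_match a b)
def Claim_changed_string_match : Prop := Dom_string_match (pvDiffWitness_string_match.1) (pvDiffWitness_string_match.2) ∧ D_string_match (pvDiffWitness_string_match.1) (pvDiffWitness_string_match.2) ∧ string_match (pvDiffWitness_string_match.1) (pvDiffWitness_string_match.2) = pvDiffWitnessOut_string_match.1 ∧ string_match_alt (pvDiffWitness_string_match.1) (pvDiffWitness_string_match.2) = pvDiffWitnessOut_string_match.2 ∧ pvDiffWitnessOut_string_match.1 ≠ pvDiffWitnessOut_string_match.2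
def Claim_exact_string_match : Prop := ∀ (a : String) (b : String), Dom_string_match a b → D_string_match a b → string_match a b ≠ string_match_alt a b

-- ===== LEMMAS AND PROOFS =====

-- a[i:i+2] as drop/take
theorem pv_slice_take2 (x : List Char) (i : Nat) :
    PySem.List.slice x (some (i : Int)) (some ((i : Int) + 2)) = (x.drop i).take 2 := by
  have h2 : ((i : Int) + 2) = ((i + 2 : Nat) : Int) := by push_cast; ring
  rw [h2, PySem.List.slice_natCast]
  congr 1
  omega

-- per-position match condition of A's (buggy) inner loop
def pv_cnt (la lb : List Char) (i : Nat) : Bool :=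
  if i + 2 ≤ lb.length then decide ((la.drop i).take 2 = (lb.drop i).take 2)
  else decide (2 ≤ lb.length) && decide ((la.drop i).take 2 = lb.drop (lb.length - 2))

-- counting a predicate that can hold at most at one place
theorem pv_countP_range_unique (p : Nat → Bool) (n j0 : Nat)
    (h : ∀ j, j < n → p j = true → j = j0) :
    (List.range n).countP p = if j0 < n ∧ p j0 = true then 1 else 0 := by
  induction n with
  | zero => simp
  | succ n ih =>
    rw [List.range_succ, List.countP_append, ih (fun j hj hp => h j (by omega) hp)]
    by_cases hpn : p n = true
    · have hn0 : n = j0 := h n (by omega) hpn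
      subst hn0
      have h1 : ¬ (n < n ∧ p n = true) := by omega
      rw [if_neg h1, if_pos ⟨by omega, hpn⟩]
      simp [hpn]
    · by_cases hj0 : j0 < n ∧ p j0 = true
      · rw [if_pos hj0, if_pos ⟨by omega, hj0.2⟩]
        simp [hpn]
      · have h2 : ¬ (j0 < n + 1 ∧ p j0 = true) := by
          rintro ⟨hlt, hp⟩
          have : j0 ≠ n := fun e => hpn (e ▸ hp)
          exact hj0 ⟨by omega, hp⟩
        rw [if_neg hj0, if_neg h2]
        simp [hpn]

-- A's inner loop counts exactly pv_cnt
theorem pv_inner_count (la lb : List Char) (i : Nat) (hi : i + 2 ≤ la.length) (acc : Int) :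
    (PySem.List.pyRange 0 ((lb.length : Int) - 1) 1).foldl
      (fun num chrs2 =>
        if PySem.List.slice la (some (i : Int)) (some ((i : Int) + 2)) =
            PySem.List.slice lb (some chrs2) (some ((i : Int) + 2)) then num + 1 else num) acc
      = if pv_cnt la lb i then acc + 1 else acc := by
  rcases Nat.lt_or_ge lb.length 1 with hm0 | hm1
  · have hm : lb.length = 0 := by omega
    rw [PySem.List.pyRange_one_eq_nil (by omega : ((lb.length : Int) - 1) ≤ 0)]
    simp [List.foldl, pv_cnt, hm]
  · have hcast : ((lb.length : Int) - 1) = ((lb.length - 1 : Nat) : Int) := by omega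
    rw [hcast, PySem.List.pyRange_zero_natCast, List.foldl_map]
    rw [PySem.List.foldl_ite_add_one]
    have hpred : ∀ j ∈ List.range (lb.length - 1),
        (decide (PySem.List.slice la (some (i : Int)) (some ((i : Int) + 2)) =
          PySem.List.slice lb (some ((j : Nat) : Int)) (some ((i : Int) + 2))))
        = decide ((la.drop i).take 2 = (lb.drop j).take (i + 2 - j)) := by
      intro j hj
      have h2 : ((i : Int) + 2) = ((i + 2 : Nat) : Int) := by push_cast; ring
      rw [pv_slice_take2, h2, PySem.List.slice_natCast]
    rw [List.countP_congr (fun j hj => by rw [hpred j hj])]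
    rw [pv_countP_range_unique _ _ (min (i + 2) lb.length - 2) ?uniq]
    case uniq =>
      intro j hj hp
      rw [decide_eq_true_eq] at hp
      have hlen := congrArg List.length hp
      simp only [List.length_take, List.length_drop] at hlen
      omega
    by_cases hc : i + 2 ≤ lb.length
    · have hj0 : min (i + 2) lb.length - 2 = i := by omega
      have hii : i + 2 - i = 2 := by omega
      rw [hj0, hii]
      have hilt : i < lb.length - 1 := by omega
      simp only [pv_cnt, if_pos hc]
      by_cases heq : (la.drop i).take 2 = (lb.drop i).take 2 <;> simp [heq, hilt]
    · have hj0 : min (i + 2) lb.length - 2 = lb.length - 2 := by omega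
      rw [hj0]
      by_cases hm2 : 2 ≤ lb.length
      · have hlt : lb.length - 2 < lb.length - 1 := by omega
        have htake : (lb.drop (lb.length - 2)).take (i + 2 - (lb.length - 2)) = lb.drop (lb.length - 2) := by
          apply List.take_of_length_le
          simp only [List.length_drop]
          omega
        rw [htake]
        simp only [pv_cnt, if_neg hc]
        by_cases heq : (la.drop i).take 2 = lb.drop (lb.length - 2) <;> simp [heq, hlt, hm2]
      · have hlt : ¬ (lb.length - 2 < lb.length - 1) := by omega
        simp only [pv_cnt, if_neg hc]
        simp [hlt, hm2]

-- A computed as a single count over positions of a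
theorem pv_A_eq (a b : String) :
    string_match a b = ((List.range (a.toList.length - 1)).countP (pv_cnt a.toList b.toList) : Int) := by
  simp only [string_match]
  rcases Nat.eq_zero_or_pos a.toList.length with h0 | h1
  · rw [PySem.List.pyRange_one_eq_nil (by omega : ((a.toList.length : Int) - 1) ≤ 0), h0]
    simp
  · have hcast : ((a.toList.length : Int) - 1) = ((a.toList.length - 1 : Nat) : Int) := by omega
    rw [hcast, PySem.List.pyRange_zero_natCast, List.foldl_map]
    have hcg : ∀ (acc : Int) (i : Nat), i ∈ List.range (a.toList.length - 1) →
        List.foldl (fun num chrs2 =>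
            if PySem.List.slice a.toList (some (i : Int)) (some ((i : Int) + 2)) =
                PySem.List.slice b.toList (some chrs2) (some ((i : Int) + 2)) then num + 1 else num)
          acc (PySem.List.pyRange 0 ((b.toList.length : Int) - 1) 1)
          = if pv_cnt a.toList b.toList i then acc + 1 else acc := by
      intro acc i hmem
      rw [List.mem_range] at hmem
      exact pv_inner_count a.toList b.toList i (by omega) acc
    rw [PySem.List.foldl_congr_mem _ _ _ _ hcg]
    rw [PySem.List.foldl_if_add_one]
    simp

-- B computed as a count over positions of the common prefix
theorem pv_B_eq (a b : String) :
    string_match_alt a b =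
      ((List.range (min a.toList.length b.toList.length - 1)).countP
        (fun i => decide ((a.toList.drop i).take 2 = (b.toList.drop i).take 2)) : Int) := by
  simp only [string_match_alt]
  have hmin : (min (a.toList.length : Int) (b.toList.length : Int))
      = ((min a.toList.length b.toList.length : Nat) : Int) := by
    simp [Nat.cast_min]
  rw [hmin]
  rcases Nat.eq_zero_or_pos (min a.toList.length b.toList.length) with h0 | h1
  · rw [PySem.List.pyRange_one_eq_nil (by omega : ((min a.toList.length b.toList.length : Nat) : Int) - 1 ≤ 0), h0]
    simp
  · have hcast : (((min a.toList.length b.toList.length : Nat) : Int) - 1)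
        = ((min a.toList.length b.toList.length - 1 : Nat) : Int) := by omega
    rw [hcast, PySem.List.pyRange_zero_natCast, List.countP_map]
    congr 1
    apply List.countP_congr
    intro j hj
    have h2 : ((j : Nat) : Int) + 2 = ((j + 2 : Nat) : Int) := by push_cast; ring
    simp only [Function.comp]
    rw [h2, PySem.List.slice_natCast, PySem.List.slice_natCast]
    have hjj : j + 2 - j = 2 := by omega
    rw [hjj]
    simp

-- the count over A's positions splits at the end of the common prefix
theorem pv_split (a b : String) :
    List.range (a.toList.length - 1)
      = List.range (min a.toList.length b.toList.length - 1)
        ++ (List.range ((a.toList.length - 1) - (min a.toList.length b.toList.length - 1))).map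
             ((min a.toList.length b.toList.length - 1) + ·) := by
  conv_lhs => rw [show a.toList.length - 1
      = (min a.toList.length b.toList.length - 1)
        + ((a.toList.length - 1) - (min a.toList.length b.toList.length - 1)) from by omega]
  rw [List.range_add]

theorem pv_prefix_agree (a b : String) :
    (List.range (min a.toList.length b.toList.length - 1)).countP (pv_cnt a.toList b.toList)
      = (List.range (min a.toList.length b.toList.length - 1)).countP
          (fun i => decide ((a.toList.drop i).take 2 = (b.toList.drop i).take 2)) := by
  apply List.countP_congr
  intro i hi
  rw [List.mem_range] at hi
  have hc : i + 2 ≤ b.toList.length := by omega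
  simp only [pv_cnt, if_pos hc]


theorem string_match_spec : Claim_unchanged_string_match := by
  intro a b _ hnd
  rw [pv_A_eq, pv_B_eq, pv_split, List.countP_append, List.countP_map, pv_prefix_agree]
  have htail : (List.range ((a.toList.length - 1) - (min a.toList.length b.toList.length - 1))).countP
      (pv_cnt a.toList b.toList ∘ ((min a.toList.length b.toList.length - 1) + ·)) = 0 := by
    rw [List.countP_eq_zero]
    intro j hj
    rw [List.mem_range] at hj
    rcases Nat.lt_or_ge a.toList.length b.toList.length with hnm | hmn
    · omega
    · have hk : min a.toList.length b.toList.length = b.toList.length := by omega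
      rw [hk] at hj ⊢
      simp only [Function.comp]
      have h1 : ¬ ((b.toList.length - 1) + j + 2 ≤ b.toList.length) := by omega
      simp only [pv_cnt, if_neg h1]
      by_cases hm2 : 2 ≤ b.toList.length
      · simp only [hm2, decide_true, Bool.true_and, Bool.not_eq_true, decide_eq_false_iff_not]
        intro heq
        apply hnd
        refine ⟨hm2, (b.toList.length - 1) + j, ?_, by omega, heq⟩
        rw [List.mem_range]
        omega
      · simp only [Bool.and_eq_true, decide_eq_true_eq, not_and]
        intro h2'
        exact absurd h2' hm2
  rw [htail]
  push_cast
  ring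

theorem string_match_changed : Claim_changed_string_match := by
  unfold Claim_changed_string_match; decide

theorem string_match_tight : Claim_exact_string_match := by
  intro a b _ hD
  obtain ⟨hm2, i, himem, hlo, heq⟩ := hD
  rw [List.mem_range] at himem
  have hhi : i < a.toList.length - 1 := himem
  have hmn : b.toList.length < a.toList.length := by omega
  have hk : min a.toList.length b.toList.length = b.toList.length := by omega
  rw [pv_A_eq, pv_B_eq, pv_split, List.countP_append, List.countP_map, pv_prefix_agree, hk]
  have hcnt : pv_cnt a.toList b.toList i = true := by
    have h1 : ¬ (i + 2 ≤ b.toList.length) := by omega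
    simp only [pv_cnt, if_neg h1, hm2, decide_true, Bool.true_and, decide_eq_true_eq]
    exact heq
  have hpos : 0 < (List.range ((a.toList.length - 1) - (b.toList.length - 1))).countP
      (pv_cnt a.toList b.toList ∘ ((b.toList.length - 1) + ·)) := by
    rw [List.countP_pos_iff]
    refine ⟨i - (b.toList.length - 1), ?_, ?_⟩
    · rw [List.mem_range]; omega
    · simp only [Function.comp]
      rw [show (b.toList.length - 1) + (i - (b.toList.length - 1)) = i from by omega]
      exact hcnt
  intro hcontra
  rw [Int.natCast_inj] at hcontra
  omega
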